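-- pv_equiv track=rewrite | github.com/joybio/multiPrime | scripts/extract_PCR_product_V1.py | degenerate_seq
-- ===== SOURCE A (Python) =====
-- from itertools import product
--
-- degenerate_base = {"R": ["A", "G"], "Y": ["C", "T"], "M": ["A", "C"], "K": ["G", "T"],
--                    "S": ["G", "C"], "W": ["A", "T"], "H": ["A", "T", "C"], "B": ["G", "T", "C"],
--                    "V": ["G", "A", "C"], "D": ["G", "A", "T"], "N": ["A", "T", "G", "C"]}
--
-- def degenerate_seq(primer):
--     seq = []
--     cs = ""
--     for s in primer:
--         if s not in degenerate_base:
--             cs += s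
--         else:
--             seq.append([cs + i for i in degenerate_base[s]])
--             cs = ""
--     if cs:
--         seq.append([cs])
--     # return ("".join(i) for i in product(*seq)) # This is a generator, just once when iteration
--     # d = [x for x in range(12)]
--     # g = (x for i in range(12))
--     # The result of list derivation returns a list, and the tuple derivation returns a generator
--     return ["".join(i) for i in product(*seq)]
-- ===== SOURCE B (Python) =====
-- degenerate_base = {"R": ["A", "G"], "Y": ["C", "T"], "M": ["A", "C"], "K": ["G", "T"],
--                    "S": ["G", "C"], "W": ["A", "T"], "H": ["A", "T", "C"], "B": ["G", "T", "C"],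
--                    "V": ["G", "A", "C"], "D": ["G", "A", "T"], "N": ["A", "T", "G", "C"]}
--
-- def degenerate_seq(primer):
--     result = [""]
--     for s in primer:
--         if s in degenerate_base:
--             result = [r + b for r in result for b in degenerate_base[s]]
--         else:
--             result = [r + s for r in result]
--     return result
-- ===== Notes on version B (the rewrite author's own statement) =====
-- stated objective: simpler
-- what changed: A groups literal runs with their following degenerate base, builds a list of choice lists and expands it with itertools.product; B drops the grouping pass and product entirely, keeping one running list of partial sequences extended character by character in a single loop.
import Mathlib
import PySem

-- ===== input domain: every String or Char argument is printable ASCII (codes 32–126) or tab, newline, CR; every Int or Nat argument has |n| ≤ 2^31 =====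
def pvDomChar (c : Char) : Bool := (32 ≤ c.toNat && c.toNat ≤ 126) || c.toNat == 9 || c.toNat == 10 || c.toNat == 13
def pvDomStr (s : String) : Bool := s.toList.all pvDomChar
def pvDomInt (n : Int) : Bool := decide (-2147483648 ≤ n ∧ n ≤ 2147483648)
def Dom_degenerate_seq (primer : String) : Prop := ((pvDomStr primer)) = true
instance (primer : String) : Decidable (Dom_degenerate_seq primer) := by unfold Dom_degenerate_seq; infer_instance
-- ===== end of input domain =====

-- B replaces A's group-then-itertools.product pipeline by a single left-to-right pass
-- extending a running list of partial sequences (objective: simpler, same cost).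

-- module-level constant shared by both versions
def degenerate_base : PySem.Dict String (List String) :=
  PySem.Dict.ofList [("R", ["A", "G"]), ("Y", ["C", "T"]), ("M", ["A", "C"]), ("K", ["G", "T"]),
   ("S", ["G", "C"]), ("W", ["A", "T"]), ("H", ["A", "T", "C"]), ("B", ["G", "T", "C"]),
   ("V", ["G", "A", "C"]), ("D", ["G", "A", "T"]), ("N", ["A", "T", "G", "C"])]

-- ===== PORT A =====
-- ["".join(i) for i in product(*seq)] over lists of strings, ported by hand:
-- itertools.product's rightmost-fastest order, with the tuple joined by string
-- concatenation as it is produced (exact for this use: all elements are strings).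
def prodJoin : List (List String) → List String
  | [] => [""]
  | g :: rest => g.flatMap (fun x => (prodJoin rest).map (fun y => x ++ y))

def degenerate_seq (primer : String) : List String :=
  -- for s in primer: if s not in degenerate_base: cs += s else: seq.append([cs + i ...]); cs = ""
  let st := primer.toList.foldl
    (fun (p : List (List String) × String) (s : Char) =>
      match PySem.Dict.get? degenerate_base s.toString with
      | none => (p.1, p.2 ++ s.toString)
      | some bs => (p.1 ++ [bs.map (fun i => p.2 ++ i)], "")) ([], "")
  -- if cs: seq.append([cs])
  let seq := if st.2 ≠ "" then st.1 ++ [[st.2]] else st.1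
  prodJoin seq

-- ===== PORT B =====
def degenerate_seq_alt (primer : String) : List String :=
  primer.toList.foldl
    (fun (result : List String) (s : Char) =>
      match PySem.Dict.get? degenerate_base s.toString with
      | some bs => result.flatMap (fun r => bs.map (fun b => r ++ b))
      | none => result.map (fun r => r ++ s.toString)) [""]

-- ===== PRECONDITION & SPEC =====
def Spec_degenerate_seq (primer : String) (out : List String) : Prop := out = degenerate_seq_alt primer
instance (primer : String) (out : List String) : Decidable (Spec_degenerate_seq primer out) := by unfold Spec_degenerate_seq; infer_instance

-- ===== CLAIM (what is proved, stated in full; the proofs are below) =====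
def Claim_equal_degenerate_seq : Prop := ∀ (primer : String), Dom_degenerate_seq primer → Spec_degenerate_seq primer (degenerate_seq primer)

-- ===== LEMMAS AND PROOFS =====

lemma prodJoin_append_singleton (seq : List (List String)) (g : List String) :
    prodJoin (seq ++ [g]) = (prodJoin seq).flatMap (fun r => g.map (fun b => r ++ b)) := by
  induction seq with
  | nil => simp [prodJoin]
  | cons h t ih =>
      simp only [List.cons_append, prodJoin, ih]
      simp only [List.flatMap_assoc, List.flatMap_map, List.map_flatMap, List.map_map,
        Function.comp_def, String.append_assoc]

-- loop invariant: B's running list after a prefix equals every completed-group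
-- combination of A's state extended by A's pending literal tail cs
lemma loop_eq (l : List Char) : ∀ (seq : List (List String)) (cs : String),
    l.foldl
      (fun (result : List String) (s : Char) =>
        match PySem.Dict.get? degenerate_base s.toString with
        | some bs => result.flatMap (fun r => bs.map (fun b => r ++ b))
        | none => result.map (fun r => r ++ s.toString))
      ((prodJoin seq).map (fun r => r ++ cs))
    = (fun st => (prodJoin st.1).map (fun r => r ++ st.2))
        (l.foldl
          (fun (p : List (List String) × String) (s : Char) =>
            match PySem.Dict.get? degenerate_base s.toString with
            | none => (p.1, p.2 ++ s.toString)
            | some bs => (p.1 ++ [bs.map (fun i => p.2 ++ i)], "")) (seq, cs)) := by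
  induction l with
  | nil => intro seq cs; rfl
  | cons s t ih =>
      intro seq cs
      simp only [List.foldl_cons]
      cases h : PySem.Dict.get? degenerate_base s.toString with
      | none =>
          dsimp only
          rw [show ((prodJoin seq).map (fun r => r ++ cs)).map (fun r => r ++ s.toString)
                = (prodJoin seq).map (fun r => r ++ (cs ++ s.toString)) by
            simp only [List.map_map, Function.comp_def, String.append_assoc]]
          exact ih seq (cs ++ s.toString)
      | some bs =>
          dsimp only
          rw [show ((prodJoin seq).map (fun r => r ++ cs)).flatMap
                  (fun r => bs.map (fun b => r ++ b))
                = (prodJoin (seq ++ [bs.map (fun i => cs ++ i)])).map (fun r => r ++ "") by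
            simp only [prodJoin_append_singleton, List.flatMap_map, List.map_map,
              Function.comp_def, String.append_empty, List.map_id', String.append_assoc]]
          exact ih (seq ++ [bs.map (fun i => cs ++ i)]) ""

-- ===== VERDICT (by name: the statement is the Claim_ definition above) =====
theorem degenerate_seq_spec : Claim_equal_degenerate_seq := by
  intro primer _
  unfold Spec_degenerate_seq degenerate_seq degenerate_seq_alt
  dsimp only
  have h := loop_eq primer.toList [] ""
  simp only [prodJoin, List.map_cons, List.map_nil, String.append_empty] at h
  rw [h]
  set st := primer.toList.foldl
    (fun (p : List (List String) × String) (s : Char) =>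
      match PySem.Dict.get? degenerate_base s.toString with
      | none => (p.1, p.2 ++ s.toString)
      | some bs => (p.1 ++ [bs.map (fun i => p.2 ++ i)], "")) (([], "") : List (List String) × String)
  by_cases hcs : st.2 = ""
  · simp [hcs, String.append_empty]
  · rw [if_pos hcs, prodJoin_append_singleton]
    simp only [List.map_cons, List.map_nil]
    rw [← List.map_eq_flatMap]
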